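-- pv_equiv track=rewrite | github.com/rushirajnoor/Log_Analyzer | auto_remediation.py | get_root_dependency
-- ===== SOURCE A (Python) =====
-- DEPENDENCY_GRAPH = {
--     "frontend": [
--         "cartservice",
--         "productcatalogservice",
--         "recommendationservice"
--     ],
--
--     "cartservice": [
--         "redis-cart"
--     ],
--
--     "checkoutservice": [
--         "paymentservice",
--         "shippingservice",
--         "emailservice"
--     ],
--
--     "productcatalogservice": [],
--
--     "recommendationservice": [],
--
--     "paymentservice": [],
--
--     "shippingservice": [],
--
--     "emailservice": [],
--
--     "redis-cart": []
-- }
--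
-- def get_root_dependency(service):
--
--     current = service
--
--     while (
--         current in DEPENDENCY_GRAPH
--         and len(DEPENDENCY_GRAPH[current]) > 0
--     ):
--         current = DEPENDENCY_GRAPH[current][0]
--
--     return current
-- ===== SOURCE B (Python) =====
-- DEPENDENCY_GRAPH = {
--     "frontend": [
--         "cartservice",
--         "productcatalogservice",
--         "recommendationservice"
--     ],
--
--     "cartservice": [
--         "redis-cart"
--     ],
--
--     "checkoutservice": [
--         "paymentservice",
--         "shippingservice",
--         "emailservice"
--     ],
--
--     "productcatalogservice": [],
--
--     "recommendationservice": [],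
--
--     "paymentservice": [],
--
--     "shippingservice": [],
--
--     "emailservice": [],
--
--     "redis-cart": []
-- }
--
--
-- def get_root_dependency(service):
--     deps = DEPENDENCY_GRAPH.get(service)
--     if not deps:
--         return service
--     return get_root_dependency(deps[0])
-- ===== Notes on version B (the rewrite author's own statement) =====
-- stated objective: simpler
-- what changed: Replaced the while-loop with a mutable 'current' by a direct recursion: the root of a service is the root of its first dependency, with a single base case (no entry or empty dependency list).
import Mathlib
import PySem

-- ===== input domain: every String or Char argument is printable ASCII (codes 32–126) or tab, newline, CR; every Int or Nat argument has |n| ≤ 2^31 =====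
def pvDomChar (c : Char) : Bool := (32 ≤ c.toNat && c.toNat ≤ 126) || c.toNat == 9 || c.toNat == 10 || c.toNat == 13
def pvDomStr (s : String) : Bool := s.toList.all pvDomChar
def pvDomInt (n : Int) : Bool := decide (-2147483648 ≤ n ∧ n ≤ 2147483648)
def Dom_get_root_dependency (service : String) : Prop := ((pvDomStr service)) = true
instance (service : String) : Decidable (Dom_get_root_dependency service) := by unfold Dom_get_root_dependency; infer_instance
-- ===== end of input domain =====

-- B replaces A's while-loop with its mutable `current` by a direct recursion on the first
-- dependency; same values on every input (objective: simpler decomposition, same cost).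

-- The module constant DEPENDENCY_GRAPH, shared by both ports.
def pvGraph : PySem.Dict String (List String) := PySem.Dict.mk
  [ ("frontend", ["cartservice", "productcatalogservice", "recommendationservice"]),
    ("cartservice", ["redis-cart"]),
    ("checkoutservice", ["paymentservice", "shippingservice", "emailservice"]),
    ("productcatalogservice", []),
    ("recommendationservice", []),
    ("paymentservice", []),
    ("shippingservice", []),
    ("emailservice", []),
    ("redis-cart", []) ]

-- ===== PORT A =====
-- A's loop: while (current in DEPENDENCY_GRAPH and len(DEPENDENCY_GRAPH[current]) > 0):
--   current = DEPENDENCY_GRAPH[current][0].  The fuel is only a totality guard: the fixed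
-- graph is acyclic with chains of length ≤ 2, so 9 iterations (one per key) never run out.
def pvLoopA : Nat → String → String
  | 0, current => current
  | Nat.succ fuel, current =>
    match pvGraph.get? current with
    | some (d :: _) => pvLoopA fuel d
    | _ => current

def get_root_dependency (service : String) : String := pvLoopA 9 service

-- ===== PORT B =====
-- termination measure for B's recursion over the fixed acyclic graph
def pvRank (s : String) : Nat :=
  if s = "frontend" then 2
  else if s = "cartservice" ∨ s = "checkoutservice" then 1
  else 0

-- needed by the port's decreasing_by, hence above the claim block
theorem pvGraph_step {s d : String} {t : List String}
    (h : pvGraph.get? s = some (d :: t)) : pvRank d < pvRank s := by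
  simp only [pvGraph, PySem.Dict.get?_mk_cons, beq_iff_eq] at h
  split_ifs at h with h1 h2 h3 h4 h5 h6 h7 h8 h9 <;>
    simp only [Option.some.injEq, List.cons.injEq, reduceCtorEq, PySem.Dict.get?,
      List.nil_eq, List.find?_nil, Option.map_none] at h <;>
    first
      | (rw [← h.1, ← h1]; decide)
      | (rw [← h.1, ← h2]; decide)
      | (rw [← h.1, ← h3]; decide)

-- B: deps = DEPENDENCY_GRAPH.get(service); if not deps: return service;
--    return get_root_dependency(deps[0])
def get_root_dependency_alt (service : String) : String :=
  match h : pvGraph.get? service with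
  | some (d :: _) => get_root_dependency_alt d
  | _ => service
termination_by pvRank service
decreasing_by exact pvGraph_step h

-- ===== PRECONDITION & SPEC =====
def Spec_get_root_dependency (service : String) (out : String) : Prop := out = get_root_dependency_alt service
instance (service : String) (out : String) : Decidable (Spec_get_root_dependency service out) := by unfold Spec_get_root_dependency; infer_instance

-- ===== CLAIM (what is proved, stated in full; the proofs are below) =====
def Claim_equal_get_root_dependency : Prop := ∀ (service : String), Dom_get_root_dependency service → Spec_get_root_dependency service (get_root_dependency service)

-- ===== LEMMAS AND PROOFS =====

-- unfolding lemmas for B's well-founded recursion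
theorem pv_alt_cons {s d : String} {t : List String}
    (h : pvGraph.get? s = some (d :: t)) :
    get_root_dependency_alt s = get_root_dependency_alt d := by
  rw [get_root_dependency_alt.eq_def]
  split
  · next d' t' heq => rw [h] at heq; cases heq; rfl
  · next hne => exact absurd h (fun hx => by cases hne d t hx)

theorem pv_alt_stop {s : String}
    (h : pvGraph.get? s = none ∨ pvGraph.get? s = some []) :
    get_root_dependency_alt s = s := by
  rw [get_root_dependency_alt.eq_def]
  split
  · next d' t' heq => rcases h with h | h <;> rw [h] at heq <;> cases heq
  · rfl

theorem pvGraph_get?_none {s : String}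
    (h1 : s ≠ "frontend") (h2 : s ≠ "cartservice") (h3 : s ≠ "checkoutservice")
    (h4 : s ≠ "productcatalogservice") (h5 : s ≠ "recommendationservice")
    (h6 : s ≠ "paymentservice") (h7 : s ≠ "shippingservice")
    (h8 : s ≠ "emailservice") (h9 : s ≠ "redis-cart") :
    pvGraph.get? s = none := by
  simp only [pvGraph, PySem.Dict.get?_mk_cons, beq_iff_eq]
  split_ifs with c1 c2 c3 c4 c5 c6 c7 c8 c9 <;>
    simp_all [eq_comm, PySem.Dict.get?]

-- ===== VERDICT (by name: the statement is the Claim_ definition above) =====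
theorem get_root_dependency_spec : Claim_equal_get_root_dependency := by
  intro s _
  unfold Spec_get_root_dependency get_root_dependency
  by_cases h1 : s = "frontend"
  · subst h1
    rw [pv_alt_cons (by decide : pvGraph.get? "frontend" =
          some ["cartservice", "productcatalogservice", "recommendationservice"]),
        pv_alt_cons (by decide : pvGraph.get? "cartservice" = some ["redis-cart"]),
        pv_alt_stop (Or.inr (by decide))]
    decide
  by_cases h2 : s = "cartservice"
  · subst h2
    rw [pv_alt_cons (by decide : pvGraph.get? "cartservice" = some ["redis-cart"]),
        pv_alt_stop (Or.inr (by decide))]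
    decide
  by_cases h3 : s = "checkoutservice"
  · subst h3
    rw [pv_alt_cons (by decide : pvGraph.get? "checkoutservice" =
          some ["paymentservice", "shippingservice", "emailservice"]),
        pv_alt_stop (Or.inr (by decide))]
    decide
  by_cases h4 : s = "productcatalogservice"
  · subst h4; rw [pv_alt_stop (Or.inr (by decide))]; decide
  by_cases h5 : s = "recommendationservice"
  · subst h5; rw [pv_alt_stop (Or.inr (by decide))]; decide
  by_cases h6 : s = "paymentservice"
  · subst h6; rw [pv_alt_stop (Or.inr (by decide))]; decide
  by_cases h7 : s = "shippingservice"
  · subst h7; rw [pv_alt_stop (Or.inr (by decide))]; decide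
  by_cases h8 : s = "emailservice"
  · subst h8; rw [pv_alt_stop (Or.inr (by decide))]; decide
  by_cases h9 : s = "redis-cart"
  · subst h9; rw [pv_alt_stop (Or.inr (by decide))]; decide
  have hn := pvGraph_get?_none h1 h2 h3 h4 h5 h6 h7 h8 h9
  rw [pv_alt_stop (Or.inl hn)]
  simp [pvLoopA, hn]
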